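-- pv_equiv track=rewrite | github.com/bprager/MemoryVault | memoryvault/onboarding.py | merge_phrase_map
-- ===== SOURCE A (Python) =====
-- from typing import Iterable, Mapping
--
-- def ordered_unique(values: Iterable[str]) -> list[str]:
--     seen: set[str] = set()
--     ordered: list[str] = []
--     for value in values:
--         if value in seen:
--             continue
--         seen.add(value)
--         ordered.append(value)
--     return ordered
--
-- def merge_phrase_map(
--     base_phrases: dict[str, list[str]],
--     extra_phrases: dict[str, list[str]],
-- ) -> dict[str, list[str]]:
--     merged = {category: list(phrases) for category, phrases in base_phrases.items()}
--     for category, phrases in extra_phrases.items():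
--         merged[category] = ordered_unique(merged.get(category, []) + list(phrases))
--     return {
--         category: values
--         for category, values in sorted(merged.items())
--         if values
--     }
-- ===== SOURCE B (Python) =====
-- def merge_phrase_map(
--     base_phrases: dict[str, list[str]],
--     extra_phrases: dict[str, list[str]],
-- ) -> dict[str, list[str]]:
--     bs = sorted(base_phrases.items())
--     es = sorted(extra_phrases.items())
--     out: dict[str, list[str]] = {}
--     i = j = 0
--     while i < len(bs) or j < len(es):
--         if j == len(es) or (i < len(bs) and bs[i][0] < es[j][0]):
--             k, vals = bs[i][0], list(bs[i][1])
--             i += 1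
--         elif i == len(bs) or es[j][0] < bs[i][0]:
--             k, vals = es[j][0], list(dict.fromkeys(es[j][1]))
--             j += 1
--         else:
--             k = bs[i][0]
--             vals = list(dict.fromkeys(bs[i][1] + es[j][1]))
--             i += 1
--             j += 1
--         if vals:
--             out[k] = vals
--     return out
-- ===== Notes on version B (the rewrite author's own statement) =====
-- stated objective: alternative
-- what changed: B replaces A's dict-based merge (copy base into a dict, update it from extra, then rebuild sorted) by a sort-then-merge-join: it sorts both item lists once and walks them with two pointers, emitting each category directly in sorted order (base list copied, extra list deduped, concatenation deduped when the key is in both) and skipping empty lists.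
import Mathlib
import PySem

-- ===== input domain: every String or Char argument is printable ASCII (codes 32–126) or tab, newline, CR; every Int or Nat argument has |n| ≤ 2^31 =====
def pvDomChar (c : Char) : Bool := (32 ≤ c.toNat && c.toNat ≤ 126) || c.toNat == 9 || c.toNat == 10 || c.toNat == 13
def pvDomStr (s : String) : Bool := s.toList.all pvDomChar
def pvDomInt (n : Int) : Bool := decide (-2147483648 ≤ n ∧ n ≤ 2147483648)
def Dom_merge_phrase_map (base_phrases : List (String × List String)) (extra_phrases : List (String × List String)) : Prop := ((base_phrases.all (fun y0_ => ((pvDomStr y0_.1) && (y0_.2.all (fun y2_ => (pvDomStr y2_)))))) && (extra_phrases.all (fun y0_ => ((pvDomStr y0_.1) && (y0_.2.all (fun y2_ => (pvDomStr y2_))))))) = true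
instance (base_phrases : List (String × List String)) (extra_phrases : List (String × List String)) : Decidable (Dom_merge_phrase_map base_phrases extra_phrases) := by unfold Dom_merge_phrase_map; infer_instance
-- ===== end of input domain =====

-- B replaces A's dict-based merge (copy base into a dict, update from extra, rebuild sorted) by a
-- sort-then-merge-join: both item lists are sorted once and walked with two pointers (objective: alternative).

-- ===== PORT A =====
-- ordered_unique: seen is a Python set (PySem.Set), ordered the output list; one fold over values.
def orderedUnique (values : List String) : List String :=
  (values.foldl
    (fun (st : PySem.Set String × List String) value =>
      if PySem.Set.contains st.1 value then st
      else (PySem.Set.add st.1 value, st.2 ++ [value]))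
    (PySem.Set.empty, [])).2

-- merged = {category: list(phrases) …}; then the update loop over extra_phrases; then
-- sorted(merged.items()) — a dict's keys are distinct, so Python's tuple sort never compares the
-- value components and sorting by the key alone is exact — filtered by truthiness (non-empty list).
def merge_phrase_map (base_phrases : List (String × List String)) (extra_phrases : List (String × List String)) : List (String × List String) :=
  let merged0 : PySem.Dict String (List String) :=
    base_phrases.foldl (fun d p => d.insert p.1 p.2) PySem.Dict.empty
  let merged : PySem.Dict String (List String) :=
    extra_phrases.foldl (fun d p => d.insert p.1 (orderedUnique (d.getD p.1 [] ++ p.2))) merged0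
  (PySem.List.sorted merged.items (fun p => p.1) false).filter (fun p => !p.2.isEmpty)

-- ===== PORT B =====
-- The two-pointer while loop over the two sorted item lists, transcribed as the obvious structural
-- recursion on the two remaining suffixes; dict.fromkeys dedup = PySem.List.dedup; the in-loop
-- 'if vals: out[k] = vals' becomes the conditional singleton prepended to the rest of the walk.
def mergeJoin : List (String × List String) → List (String × List String) → List (String × List String)
  | [], [] => []
  | (k, v) :: bs, [] =>
      (if v.isEmpty then [] else [(k, v)]) ++ mergeJoin bs []
  | [], (k, ev) :: es =>
      let vals := PySem.List.dedup ev
      (if vals.isEmpty then [] else [(k, vals)]) ++ mergeJoin [] es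
  | (kb, v) :: bs, (ke, ev) :: es =>
      if kb < ke then
        (if v.isEmpty then [] else [(kb, v)]) ++ mergeJoin bs ((ke, ev) :: es)
      else if ke < kb then
        let vals := PySem.List.dedup ev
        (if vals.isEmpty then [] else [(ke, vals)]) ++ mergeJoin ((kb, v) :: bs) es
      else
        let vals := PySem.List.dedup (v ++ ev)
        (if vals.isEmpty then [] else [(kb, vals)]) ++ mergeJoin bs es
termination_by bs es => bs.length + es.length

-- bs = sorted(base_phrases.items()); es = sorted(extra_phrases.items()); keys are distinct under
-- Pre_, so Python's tuple sort never compares the value components and sorting by the key is exact.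
def merge_phrase_map_alt (base_phrases : List (String × List String)) (extra_phrases : List (String × List String)) : List (String × List String) :=
  mergeJoin (PySem.List.sorted base_phrases (fun p => p.1) false)
            (PySem.List.sorted extra_phrases (fun p => p.1) false)

-- ===== PRECONDITION & SPEC =====
-- Pre_ excludes association lists with duplicate keys: they do not faithfully represent a Python
-- dict argument (Python collapses duplicates before either function runs), so which occurrence a
-- port reads there is accidental.
def Pre_merge_phrase_map (base_phrases : List (String × List String)) (extra_phrases : List (String × List String)) : Prop :=
  (base_phrases.map (·.1)).Nodup ∧ (extra_phrases.map (·.1)).Nodup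
instance (base_phrases : List (String × List String)) (extra_phrases : List (String × List String)) : Decidable (Pre_merge_phrase_map base_phrases extra_phrases) := by unfold Pre_merge_phrase_map; infer_instance

def pvWitness_merge_phrase_map : (List (String × List String)) × (List (String × List String)) :=
  ([("animal", ["cat", "cat"]), ("empty", [])],
   [("animal", ["dog", "cat"]), ("color", ["red", "red"])])

def Spec_merge_phrase_map (base_phrases : List (String × List String)) (extra_phrases : List (String × List String)) (out : List (String × List String)) : Prop := out = merge_phrase_map_alt base_phrases extra_phrases
instance (base_phrases : List (String × List String)) (extra_phrases : List (String × List String)) (out : List (String × List String)) : Decidable (Spec_merge_phrase_map base_phrases extra_phrases out) := by unfold Spec_merge_phrase_map; infer_instance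

-- ===== CLAIM (what is proved, stated in full; the proofs are below) =====
def Claim_equal_merge_phrase_map : Prop := ∀ (base_phrases : List (String × List String)) (extra_phrases : List (String × List String)), Dom_merge_phrase_map base_phrases extra_phrases → Pre_merge_phrase_map base_phrases extra_phrases → Spec_merge_phrase_map base_phrases extra_phrases (merge_phrase_map base_phrases extra_phrases)

-- ===== LEMMAS AND PROOFS =====

-- dict.get(k) on an association list (first match) — proof-side abbreviation.
def lookupGet? (m : List (String × List String)) (k : String) : Option (List String) :=
  (m.find? (fun p => p.1 == k)).map (·.2)

-- the value both programs compute for key k (given the original maps): extra present ⇒ dedup of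
-- base's list (or []) ++ extra's list; otherwise base's list.
def wv (xs ys : List (String × List String)) (k : String) : List String :=
  match lookupGet? ys k with
  | some ev => PySem.List.dedup ((lookupGet? xs k).getD [] ++ ev)
  | none    => (lookupGet? xs k).getD []

-- the merged (deduplicated) sorted key sequence, proof-side mirror of the pointer walk
def mergeK : List String → List String → List String
  | [], [] => []
  | k :: bs, [] => k :: mergeK bs []
  | [], k :: es => k :: mergeK [] es
  | kb :: bs, ke :: es =>
    if kb < ke then kb :: mergeK bs (ke :: es)
    else if ke < kb then ke :: mergeK (kb :: bs) es
    else kb :: mergeK bs es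
termination_by bs es => bs.length + es.length

-- ordered_unique keeps seen and ordered in lockstep: both equal the fold of Set.add.
theorem orderedUnique_aux (values : List String) (s : List String) :
    values.foldl
      (fun (st : PySem.Set String × List String) value =>
        if PySem.Set.contains st.1 value then st
        else (PySem.Set.add st.1 value, st.2 ++ [value]))
      (s, s)
    = (values.foldl PySem.Set.add s, values.foldl PySem.Set.add s) := by
  induction values generalizing s with
  | nil => rfl
  | cons v t ih =>
    simp only [List.foldl_cons]
    have hadd : PySem.Set.add s v = if PySem.Set.contains s v then s else s ++ [v] := rfl
    by_cases h : PySem.Set.contains s v = true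
    · rw [if_pos h, hadd, if_pos h]
      exact ih s
    · rw [if_neg h, hadd, if_neg h]
      exact ih (s ++ [v])

theorem orderedUnique_eq_dedup (values : List String) :
    orderedUnique values = PySem.List.dedup values := by
  unfold orderedUnique
  have h := orderedUnique_aux values []
  simp only [PySem.Set.empty] at *
  rw [h, PySem.List.dedup_eq_ofList, PySem.Set.ofList_eq_foldl]

-- a fold of inserts never touches a key outside the list
theorem get?_foldl_insert_not_mem {g : PySem.Dict String (List String) → (String × List String) → List String}
    (l : List (String × List String)) (d : PySem.Dict String (List String)) (k : String)
    (h : k ∉ l.map (·.1)) :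
    (l.foldl (fun d p => d.insert p.1 (g d p)) d).get? k = d.get? k := by
  induction l generalizing d with
  | nil => rfl
  | cons p t ih =>
    simp only [List.map_cons, List.mem_cons, not_or] at h
    simp only [List.foldl_cons]
    rw [ih _ h.2, PySem.Dict.get?_insert_of_ne _ _ h.1]

-- building the base dict: lookups are first (= only) matches of base
theorem get?_foldl_insert_pairs (l : List (String × List String)) (d : PySem.Dict String (List String))
    (k : String) (hnd : (l.map (·.1)).Nodup) :
    (l.foldl (fun d p => d.insert p.1 p.2) d).get? k
      = match l.find? (fun p => p.1 == k) with
        | some p => some p.2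
        | none => d.get? k := by
  induction l generalizing d with
  | nil => rfl
  | cons p t ih =>
    simp only [List.map_cons, List.nodup_cons] at hnd
    simp only [List.foldl_cons, List.find?_cons]
    by_cases h : p.1 = k
    · subst h
      simp only [beq_self_eq_true]
      rw [get?_foldl_insert_not_mem (g := fun _ q => q.2) t (d.insert p.1 p.2) p.1 hnd.1,
          PySem.Dict.get?_insert_self]
    · have hb : (p.1 == k) = false := by simp [h]
      simp only [hb]
      rw [ih _ hnd.2]
      cases t.find? (fun q => q.1 == k) with
      | some q => rfl
      | none => exact PySem.Dict.get?_insert_of_ne _ _ (fun hkk => h hkk.symm)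

-- the extra update loop: each key is updated exactly once, from the original dict's value
theorem get?_foldl_update (l : List (String × List String)) (d : PySem.Dict String (List String))
    (k : String) (hnd : (l.map (·.1)).Nodup) :
    (l.foldl (fun d p => d.insert p.1 (orderedUnique (d.getD p.1 [] ++ p.2))) d).get? k
      = match l.find? (fun p => p.1 == k) with
        | some p => some (orderedUnique (d.getD k [] ++ p.2))
        | none => d.get? k := by
  induction l generalizing d with
  | nil => rfl
  | cons p t ih =>
    simp only [List.map_cons, List.nodup_cons] at hnd
    simp only [List.foldl_cons, List.find?_cons]
    by_cases h : p.1 = k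
    · subst h
      simp only [beq_self_eq_true]
      rw [get?_foldl_insert_not_mem
            (g := fun d q => orderedUnique (d.getD q.1 [] ++ q.2)) t _ p.1 hnd.1,
          PySem.Dict.get?_insert_self]
    · have hb : (p.1 == k) = false := by simp [h]
      simp only [hb]
      rw [ih _ hnd.2]
      have hne : k ≠ p.1 := fun hkk => h hkk.symm
      have hgd : ∀ v, (d.insert p.1 v).getD k [] = d.getD k [] :=
        fun v => PySem.Dict.getD_insert_of_ne _ _ _ hne
      cases t.find? (fun q => q.1 == k) with
      | some q => simp only [hgd]
      | none => exact PySem.Dict.get?_insert_of_ne _ _ hne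

-- find? on the key column vs membership
theorem find?_isSome_of_mem (l : List (String × List String)) (k : String)
    (h : k ∈ l.map (·.1)) : (l.find? (fun p => p.1 == k)).isSome := by
  obtain ⟨p, hp, hk⟩ := List.mem_map.mp h
  exact List.find?_isSome.mpr ⟨p, hp, by simp [hk]⟩

-- lookup is permutation-invariant when keys are distinct
theorem lookup_eq_of_perm (l1 l2 : List (String × List String)) (h : l1.Perm l2)
    (hnd : (l1.map (·.1)).Nodup) (k : String) : lookupGet? l1 k = lookupGet? l2 k := by
  unfold lookupGet?
  cases hf : l1.find? (fun p => p.1 == k) with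
  | none =>
    have hno : ∀ p ∈ l1, p.1 ≠ k := by
      intro p hp hpk
      have := List.find?_eq_none.mp hf p hp
      simp [hpk] at this
    rw [List.find?_eq_none.mpr (fun p hp => by simp [hno p ((h.mem_iff).mpr hp)])]
  | some q =>
    have hq : q ∈ l1 := List.mem_of_find?_eq_some hf
    have hqk : q.1 = k := by simpa using List.find?_some hf
    have hs : (l2.find? (fun p => p.1 == k)).isSome :=
      List.find?_isSome.mpr ⟨q, h.mem_iff.mp hq, by simp [hqk]⟩
    obtain ⟨q', hq'⟩ := Option.isSome_iff_exists.mp hs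
    have hq'mem : q' ∈ l1 := h.mem_iff.mpr (List.mem_of_find?_eq_some hq')
    have hq'k : q'.1 = k := by simpa using List.find?_some hq'
    have : q' = q := List.inj_on_of_nodup_map hnd hq'mem hq (hq'k.trans hqk.symm)
    rw [hq', this]

-- small lookup facts
theorem lookup_nil (k : String) : lookupGet? [] k = none := rfl

theorem lookup_head (k : String) (v : List String) (rest : List (String × List String)) :
    lookupGet? ((k, v) :: rest) k = some v := by
  simp [lookupGet?]

theorem lookup_cons_ne (k kh : String) (vh : List String) (rest : List (String × List String))
    (hne : kh ≠ k) : lookupGet? ((kh, vh) :: rest) k = lookupGet? rest k := by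
  simp [lookupGet?, hne]

theorem lookup_eq_none_of_forall_ne (l : List (String × List String)) (k : String)
    (h : ∀ p ∈ l, p.1 ≠ k) : lookupGet? l k = none := by
  unfold lookupGet?
  rw [List.find?_eq_none.mpr (fun p hp => by simp [h p hp])]
  rfl

-- mergeK membership and sortedness
theorem mem_mergeK (l1 l2 : List String) (a : String) :
    a ∈ mergeK l1 l2 ↔ a ∈ l1 ∨ a ∈ l2 := by
  induction l1, l2 using mergeK.induct with
  | case1 => simp [mergeK]
  | case2 k bs ih => simp [mergeK, ih]
  | case3 k es ih => simp [mergeK, ih]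
  | case4 kb bs ke es hlt ih => simp [mergeK, hlt, ih]; tauto
  | case5 kb bs ke es hlt hlt2 ih => simp [mergeK, hlt, hlt2, ih]; tauto
  | case6 kb bs ke es hlt hlt2 ih =>
    have : kb = ke := le_antisymm (not_lt.mp hlt2) (not_lt.mp hlt)
    subst this
    simp [mergeK, ih]; tauto

theorem pairwise_mergeK (l1 l2 : List String) (h1 : l1.Pairwise (· < ·))
    (h2 : l2.Pairwise (· < ·)) : (mergeK l1 l2).Pairwise (· < ·) := by
  induction l1, l2 using mergeK.induct with
  | case1 => rw [mergeK]; exact List.Pairwise.nil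
  | case2 k bs ih =>
    rw [List.pairwise_cons] at h1
    rw [mergeK, List.pairwise_cons]
    refine ⟨fun a ha => ?_, ih h1.2 h2⟩
    rcases (mem_mergeK _ _ _).mp ha with h | h
    · exact h1.1 a h
    · cases h
  | case3 k es ih =>
    rw [List.pairwise_cons] at h2
    rw [mergeK, List.pairwise_cons]
    refine ⟨fun a ha => ?_, ih h1 h2.2⟩
    rcases (mem_mergeK _ _ _).mp ha with h | h
    · cases h
    · exact h2.1 a h
  | case4 kb bs ke es hlt ih =>
    rw [List.pairwise_cons] at h1
    rw [mergeK, if_pos hlt, List.pairwise_cons]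
    refine ⟨fun a ha => ?_, ih h1.2 h2⟩
    rcases (mem_mergeK _ _ _).mp ha with h | h
    · exact h1.1 a h
    · rcases List.mem_cons.mp h with h | h
      · exact h ▸ hlt
      · exact lt_trans hlt ((List.pairwise_cons.mp h2).1 a h)
  | case5 kb bs ke es hlt hlt2 ih =>
    rw [List.pairwise_cons] at h2
    rw [mergeK, if_neg hlt, if_pos hlt2, List.pairwise_cons]
    refine ⟨fun a ha => ?_, ih h1 h2.2⟩
    rcases (mem_mergeK _ _ _).mp ha with h | h
    · rcases List.mem_cons.mp h with h | h
      · exact h ▸ hlt2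
      · exact lt_trans hlt2 ((List.pairwise_cons.mp h1).1 a h)
    · exact h2.1 a h
  | case6 kb bs ke es hlt hlt2 ih =>
    have heq : kb = ke := le_antisymm (not_lt.mp hlt2) (not_lt.mp hlt)
    subst heq
    rw [List.pairwise_cons] at h1 h2
    rw [mergeK, if_neg hlt, if_neg hlt2, List.pairwise_cons]
    refine ⟨fun a ha => ?_, ih h1.2 h2.2⟩
    rcases (mem_mergeK _ _ _).mp ha with h | h
    · exact h1.1 a h
    · exact h2.1 a h

-- two strictly increasing lists with the same members are equal
theorem eq_of_pairwise_lt_mem (l1 l2 : List String) (h1 : l1.Pairwise (· < ·))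
    (h2 : l2.Pairwise (· < ·)) (hm : ∀ a, a ∈ l1 ↔ a ∈ l2) : l1 = l2 := by
  have hn1 : l1.Nodup := h1.imp (fun h => ne_of_lt h)
  have hn2 : l2.Nodup := h2.imp (fun h => ne_of_lt h)
  have hperm : l1.Perm l2 := (List.perm_ext_iff_of_nodup hn1 hn2).mpr hm
  exact List.Perm.eq_of_pairwise
    (fun a b _ _ hab hba => absurd hba (lt_asymm hab)) h1 h2 hperm

-- filter+map congruence over the same spine
theorem filter_map_congr {α : Type} (l : List String) (p q : String → Bool) (f g : String → α)
    (h : ∀ k ∈ l, p k = q k ∧ f k = g k) : (l.filter p).map f = (l.filter q).map g := by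
  rw [List.filter_congr (fun k hk => (h k hk).1)]
  exact List.map_congr_left (fun k hk => (h k (List.mem_of_mem_filter hk)).2)

-- dropping a head whose key differs does not change wv
theorem wv_cons_left_ne (kh : String) (vh : List String) (xs ys : List (String × List String))
    (k : String) (h : kh ≠ k) : wv ((kh, vh) :: xs) ys k = wv xs ys k := by
  unfold wv
  rw [lookup_cons_ne k kh vh xs h]

theorem wv_cons_right_ne (kh : String) (vh : List String) (xs ys : List (String × List String))
    (k : String) (h : kh ≠ k) : wv xs ((kh, vh) :: ys) k = wv xs ys k := by
  unfold wv
  rw [lookup_cons_ne k kh vh ys h]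

-- the merge-join walk over strictly key-increasing lists computes wv at each merged key
theorem mergeJoin_eq (xs ys : List (String × List String))
    (hx : xs.Pairwise (fun a b => a.1 < b.1)) (hy : ys.Pairwise (fun a b => a.1 < b.1)) :
    mergeJoin xs ys
      = ((mergeK (xs.map (·.1)) (ys.map (·.1))).filter (fun k => !(wv xs ys k).isEmpty)).map
          (fun k => (k, wv xs ys k)) := by
  induction xs, ys using mergeJoin.induct with
  | case1 => simp [mergeJoin, mergeK]
  | case2 k v bs ih =>

    obtain ⟨hk, hx'⟩ := List.pairwise_cons.mp hx
    have hhead : wv ((k, v) :: bs) [] k = v := by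
      unfold wv
      rw [lookup_nil, lookup_head]
      rfl
    have hcongr : ((mergeK (bs.map (·.1)) (([] : List (String × List String)).map (·.1))).filter
          (fun a => !(wv bs [] a).isEmpty)).map (fun a => (a, wv bs [] a))
        = ((mergeK (bs.map (·.1)) (([] : List (String × List String)).map (·.1))).filter
          (fun a => !(wv ((k, v) :: bs) [] a).isEmpty)).map (fun a => (a, wv ((k, v) :: bs) [] a)) := by
      apply filter_map_congr
      intro a ha
      rcases (mem_mergeK _ _ _).mp ha with h | h
      · obtain ⟨p, hp, rfl⟩ := List.mem_map.mp h
        rw [wv_cons_left_ne _ _ _ _ _ (ne_of_lt (hk p hp))]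
        exact ⟨rfl, rfl⟩
      · simp at h
    rw [mergeJoin, ih hx' List.Pairwise.nil, hcongr]
    simp only [List.map_cons, List.map_nil]
    rw [show mergeK (k :: bs.map (·.1)) [] = k :: mergeK (bs.map (·.1)) [] from by rw [mergeK]]
    rw [List.filter_cons]
    by_cases hv : v.isEmpty
    · simp [hhead, hv]
    · simp [hhead, hv]
  | case3 k ev es ih =>

    obtain ⟨hk, hy'⟩ := List.pairwise_cons.mp hy
    have hhead : wv [] ((k, ev) :: es) k = PySem.List.dedup ev := by
      unfold wv
      rw [lookup_head, lookup_nil]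
      rfl
    have hcongr : ((mergeK (([] : List (String × List String)).map (·.1)) (es.map (·.1))).filter
          (fun a => !(wv [] es a).isEmpty)).map (fun a => (a, wv [] es a))
        = ((mergeK (([] : List (String × List String)).map (·.1)) (es.map (·.1))).filter
          (fun a => !(wv [] ((k, ev) :: es) a).isEmpty)).map (fun a => (a, wv [] ((k, ev) :: es) a)) := by
      apply filter_map_congr
      intro a ha
      rcases (mem_mergeK _ _ _).mp ha with h | h
      · simp at h
      · obtain ⟨p, hp, rfl⟩ := List.mem_map.mp h
        rw [wv_cons_right_ne _ _ _ _ _ (ne_of_lt (hk p hp))]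
        exact ⟨rfl, rfl⟩
    rw [mergeJoin, ih List.Pairwise.nil hy', hcongr]
    simp only [List.map_cons, List.map_nil]
    rw [show mergeK [] (k :: es.map (·.1)) = k :: mergeK [] (es.map (·.1)) from by rw [mergeK]]
    rw [List.filter_cons]
    by_cases hv : PySem.Set.ofList ev = []
    · simp [hhead, hv]
    · simp [hhead, hv]
  | case4 kb v bs ke ev es hlt ih =>

    obtain ⟨hkb, hx'⟩ := List.pairwise_cons.mp hx
    obtain ⟨hke, hy'⟩ := List.pairwise_cons.mp hy
    have hylt : ∀ p ∈ (ke, ev) :: es, kb < p.1 := by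
      intro p hp
      rcases List.mem_cons.mp hp with h | h
      · rw [h]; exact hlt
      · exact lt_trans hlt (hke p h)
    have hhead : wv ((kb, v) :: bs) ((ke, ev) :: es) kb = v := by
      unfold wv
      rw [lookup_eq_none_of_forall_ne _ _ (fun p hp => ne_of_gt (hylt p hp)), lookup_head]
      rfl
    have hcongr : ((mergeK (bs.map (·.1)) (((ke, ev) :: es).map (·.1))).filter
          (fun a => !(wv bs ((ke, ev) :: es) a).isEmpty)).map (fun a => (a, wv bs ((ke, ev) :: es) a))
        = ((mergeK (bs.map (·.1)) (((ke, ev) :: es).map (·.1))).filter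
          (fun a => !(wv ((kb, v) :: bs) ((ke, ev) :: es) a).isEmpty)).map
          (fun a => (a, wv ((kb, v) :: bs) ((ke, ev) :: es) a)) := by
      apply filter_map_congr
      intro a ha
      have hne : kb ≠ a := by
        rcases (mem_mergeK _ _ _).mp ha with h | h
        · obtain ⟨p, hp, rfl⟩ := List.mem_map.mp h
          exact ne_of_lt (hkb p hp)
        · obtain ⟨p, hp, rfl⟩ := List.mem_map.mp h
          exact ne_of_lt (hylt p hp)
      rw [wv_cons_left_ne _ _ _ _ _ hne]
      exact ⟨rfl, rfl⟩
    rw [mergeJoin, if_pos hlt, ih hx' hy, hcongr]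
    simp only [List.map_cons]
    rw [show mergeK (kb :: bs.map (·.1)) (ke :: es.map (·.1))
          = kb :: mergeK (bs.map (·.1)) (ke :: es.map (·.1)) from by rw [mergeK, if_pos hlt]]
    rw [List.filter_cons]
    by_cases hv : v.isEmpty
    · simp [hhead, hv]
    · simp [hhead, hv]
  | case5 kb v bs ke ev es hlt hlt2 ih =>

    obtain ⟨hkb, hx'⟩ := List.pairwise_cons.mp hx
    obtain ⟨hke, hy'⟩ := List.pairwise_cons.mp hy
    have hxlt : ∀ p ∈ (kb, v) :: bs, ke < p.1 := by
      intro p hp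
      rcases List.mem_cons.mp hp with h | h
      · rw [h]; exact hlt2
      · exact lt_trans hlt2 (hkb p h)
    have hhead : wv ((kb, v) :: bs) ((ke, ev) :: es) ke = PySem.List.dedup ev := by
      unfold wv
      rw [lookup_head, lookup_eq_none_of_forall_ne _ _ (fun p hp => ne_of_gt (hxlt p hp))]
      rfl
    have hcongr : ((mergeK (((kb, v) :: bs).map (·.1)) (es.map (·.1))).filter
          (fun a => !(wv ((kb, v) :: bs) es a).isEmpty)).map (fun a => (a, wv ((kb, v) :: bs) es a))
        = ((mergeK (((kb, v) :: bs).map (·.1)) (es.map (·.1))).filter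
          (fun a => !(wv ((kb, v) :: bs) ((ke, ev) :: es) a).isEmpty)).map
          (fun a => (a, wv ((kb, v) :: bs) ((ke, ev) :: es) a)) := by
      apply filter_map_congr
      intro a ha
      have hne : ke ≠ a := by
        rcases (mem_mergeK _ _ _).mp ha with h | h
        · obtain ⟨p, hp, rfl⟩ := List.mem_map.mp h
          exact ne_of_lt (hxlt p hp)
        · obtain ⟨p, hp, rfl⟩ := List.mem_map.mp h
          exact ne_of_lt (hke p hp)
      rw [wv_cons_right_ne _ _ _ _ _ hne]
      exact ⟨rfl, rfl⟩
    rw [mergeJoin, if_neg hlt, if_pos hlt2, ih hx hy', hcongr]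
    simp only [List.map_cons]
    rw [show mergeK (kb :: bs.map (·.1)) (ke :: es.map (·.1))
          = ke :: mergeK (kb :: bs.map (·.1)) (es.map (·.1)) from by rw [mergeK, if_neg hlt, if_pos hlt2]]
    rw [List.filter_cons]
    by_cases hv : PySem.Set.ofList ev = []
    · simp [hhead, hv]
    · simp [hhead, hv]
  | case6 kb v bs ke ev es hlt hlt2 ih =>

    have heq : kb = ke := le_antisymm (not_lt.mp hlt2) (not_lt.mp hlt)
    subst heq
    obtain ⟨hkb, hx'⟩ := List.pairwise_cons.mp hx
    obtain ⟨hke, hy'⟩ := List.pairwise_cons.mp hy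
    have hhead : wv ((kb, v) :: bs) ((kb, ev) :: es) kb = PySem.List.dedup (v ++ ev) := by
      unfold wv
      rw [lookup_head, lookup_head]
      rfl
    have hcongr : ((mergeK (bs.map (·.1)) (es.map (·.1))).filter
          (fun a => !(wv bs es a).isEmpty)).map (fun a => (a, wv bs es a))
        = ((mergeK (bs.map (·.1)) (es.map (·.1))).filter
          (fun a => !(wv ((kb, v) :: bs) ((kb, ev) :: es) a).isEmpty)).map
          (fun a => (a, wv ((kb, v) :: bs) ((kb, ev) :: es) a)) := by
      apply filter_map_congr
      intro a ha
      have hne : kb ≠ a := by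
        rcases (mem_mergeK _ _ _).mp ha with h | h
        · obtain ⟨p, hp, rfl⟩ := List.mem_map.mp h
          exact ne_of_lt (hkb p hp)
        · obtain ⟨p, hp, rfl⟩ := List.mem_map.mp h
          exact ne_of_lt (hke p hp)
      rw [wv_cons_left_ne _ _ _ _ _ hne, wv_cons_right_ne _ _ _ _ _ hne]
      exact ⟨rfl, rfl⟩
    rw [mergeJoin, if_neg hlt, if_neg hlt2, ih hx' hy', hcongr]
    simp only [List.map_cons]
    rw [show mergeK (kb :: bs.map (·.1)) (kb :: es.map (·.1))
          = kb :: mergeK (bs.map (·.1)) (es.map (·.1)) from by rw [mergeK, if_neg hlt, if_neg hlt2]]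
    rw [List.filter_cons]
    by_cases hv : PySem.Set.ofList (v ++ ev) = []
    · simp [hhead, hv]
    · simp [hhead, hv]

-- A reduced to the canonical sorted-keys form
theorem A_canonical (b e : List (String × List String))
    (hb : (b.map (·.1)).Nodup) (he : (e.map (·.1)).Nodup) :
    merge_phrase_map b e
      = ((PySem.List.sorted (PySem.Set.ofList (b.map (·.1) ++ e.map (·.1))) (fun k => k) false).filter
          (fun k => !(wv b e k).isEmpty)).map (fun k => (k, wv b e k)) := by
  unfold merge_phrase_map
  simp only []
  set m0 : PySem.Dict String (List String) :=
    b.foldl (fun d p => d.insert p.1 p.2) PySem.Dict.empty with hm0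
  set m : PySem.Dict String (List String) :=
    e.foldl (fun d p => d.insert p.1 (orderedUnique (d.getD p.1 [] ++ p.2))) m0 with hm
  have hkeys : m.keys = PySem.Set.ofList (b.map (·.1) ++ e.map (·.1)) := by
    rw [hm, PySem.Dict.keys_foldl_insert_key e (·.1) _ m0,
        hm0, PySem.Dict.keys_foldl_insert_key b (·.1) _ PySem.Dict.empty]
    simp [PySem.Set.update, PySem.Set.ofList_eq_foldl, List.foldl_append, PySem.Dict.keys_empty]
  have hnd0 : m0.keys.Nodup := by
    rw [hm0]
    exact PySem.Dict.nodup_keys_foldl_insert_key b (fun p => p.1)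
      (fun _ p => p.2) PySem.Dict.empty (by simp)
  have hnd : m.keys.Nodup := by
    rw [hm]
    exact PySem.Dict.nodup_keys_foldl_insert_key e (fun p => p.1)
      (fun d p => orderedUnique (d.getD p.1 [] ++ p.2)) m0 hnd0
  set K := PySem.List.sorted (PySem.Set.ofList (b.map (·.1) ++ e.map (·.1))) (fun k => k) false
    with hK
  have hsorted : PySem.List.sorted m.items (fun p => p.1) false
      = K.map (fun k => (k, m.getD k [])) := by
    apply PySem.List.sorted_eq_of_perm_of_pairwise_lt
    · rw [PySem.Dict.items_eq_map_keys m hnd []]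
      refine List.Perm.map _ ?_
      rw [hK, ← hkeys]
      exact PySem.List.sorted_perm m.keys (fun k => k) false
    · have hpk : K.Pairwise (· < ·) := by
        rw [hK]; exact PySem.List.sorted_ofList_pairwise_lt _
      exact List.pairwise_map.mpr hpk
  rw [hsorted, List.filter_map]
  have hval : ∀ k ∈ K, m.getD k [] = wv b e k := by
    intro k hk
    have hget := get?_foldl_update e m0 k he
    rw [← hm] at hget
    have hget0 := get?_foldl_insert_pairs b PySem.Dict.empty k hb
    rw [← hm0] at hget0
    unfold wv lookupGet?
    cases hfe : e.find? (fun p => p.1 == k) with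
    | some q =>
      simp only [hfe] at hget
      simp only [Option.map_some]
      rw [PySem.Dict.getD_eq_get?_getD, hget, Option.getD_some, orderedUnique_eq_dedup]
      congr 1
      rw [PySem.Dict.getD_eq_get?_getD, hget0]
      cases hfb : b.find? (fun p => p.1 == k) with
      | some p => simp
      | none => simp [PySem.Dict.get?_empty]
    | none =>
      simp only [hfe] at hget
      simp only [Option.map_none]
      have hkbe : k ∈ b.map (·.1) ++ e.map (·.1) := by
        rw [hK, PySem.List.mem_sorted] at hk
        exact (PySem.Set.mem_ofList _ _).mp hk
      have hke : k ∉ e.map (·.1) := by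
        intro hmem
        have := find?_isSome_of_mem e k hmem
        rw [hfe] at this; exact (Bool.false_ne_true this)
      have hkb : k ∈ b.map (·.1) := by
        rcases List.mem_append.mp hkbe with h | h
        · exact h
        · exact absurd h hke
      rw [PySem.Dict.getD_eq_get?_getD, hget, hget0]
      cases hfb : b.find? (fun p => p.1 == k) with
      | some p => simp
      | none =>
        have := find?_isSome_of_mem b k hkb
        rw [hfb] at this; exact absurd this (by simp)
  apply filter_map_congr
  intro k hk
  simp only [Function.comp_apply]
  rw [hval k hk]
  exact ⟨rfl, rfl⟩

-- B reduced to the same canonical form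
theorem B_canonical (b e : List (String × List String))
    (hb : (b.map (·.1)).Nodup) (he : (e.map (·.1)).Nodup) :
    merge_phrase_map_alt b e
      = ((PySem.List.sorted (PySem.Set.ofList (b.map (·.1) ++ e.map (·.1))) (fun k => k) false).filter
          (fun k => !(wv b e k).isEmpty)).map (fun k => (k, wv b e k)) := by
  unfold merge_phrase_map_alt
  have hpermx : (PySem.List.sorted b (fun p => p.1) false).Perm b :=
    PySem.List.sorted_perm b (fun p => p.1) false
  have hpermy : (PySem.List.sorted e (fun p => p.1) false).Perm e :=
    PySem.List.sorted_perm e (fun p => p.1) false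
  have hndx : ((PySem.List.sorted b (fun p => p.1) false).map (·.1)).Nodup :=
    ((hpermx.map (·.1)).nodup_iff).mpr hb
  have hndy : ((PySem.List.sorted e (fun p => p.1) false).map (·.1)).Nodup :=
    ((hpermy.map (·.1)).nodup_iff).mpr he
  have hpx : (PySem.List.sorted b (fun p => p.1) false).Pairwise (fun a b => a.1 < b.1) := by
    have h1 := PySem.List.sorted_pairwise b (fun p => p.1)
    have h2 : (PySem.List.sorted b (fun p => p.1) false).Pairwise (fun a b => a.1 ≠ b.1) :=
      List.pairwise_map.mp hndx
    exact (h1.and h2).imp (fun h => lt_of_le_of_ne h.1 h.2)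
  have hpy : (PySem.List.sorted e (fun p => p.1) false).Pairwise (fun a b => a.1 < b.1) := by
    have h1 := PySem.List.sorted_pairwise e (fun p => p.1)
    have h2 : (PySem.List.sorted e (fun p => p.1) false).Pairwise (fun a b => a.1 ≠ b.1) :=
      List.pairwise_map.mp hndy
    exact (h1.and h2).imp (fun h => lt_of_le_of_ne h.1 h.2)
  rw [mergeJoin_eq _ _ hpx hpy]
  have hwv : ∀ k, wv (PySem.List.sorted b (fun p => p.1) false)
      (PySem.List.sorted e (fun p => p.1) false) k = wv b e k := by
    intro k
    unfold wv
    rw [lookup_eq_of_perm _ b hpermx hndx k, lookup_eq_of_perm _ e hpermy hndy k]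
  have hKeq : mergeK ((PySem.List.sorted b (fun p => p.1) false).map (·.1))
        ((PySem.List.sorted e (fun p => p.1) false).map (·.1))
      = PySem.List.sorted (PySem.Set.ofList (b.map (·.1) ++ e.map (·.1))) (fun k => k) false := by
    apply eq_of_pairwise_lt_mem
    · exact pairwise_mergeK _ _ (List.pairwise_map.mpr hpx) (List.pairwise_map.mpr hpy)
    · exact PySem.List.sorted_ofList_pairwise_lt _
    · intro a
      rw [mem_mergeK, PySem.List.mem_sorted]
      rw [PySem.Set.mem_ofList, List.mem_append]
      have h1 := (hpermx.map (·.1)).mem_iff (a := a)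
      have h2 := (hpermy.map (·.1)).mem_iff (a := a)
      tauto
  rw [hKeq]
  apply filter_map_congr
  intro k hk
  rw [hwv k]
  exact ⟨rfl, rfl⟩

-- ===== VERDICT (by name: the statement is the Claim_ definition above) =====
theorem merge_phrase_map_spec : Claim_equal_merge_phrase_map := by
  intro b e _ hpre
  show merge_phrase_map b e = merge_phrase_map_alt b e
  rw [A_canonical b e hpre.1 hpre.2, B_canonical b e hpre.1 hpre.2]
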